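-- pv_equiv track=rewrite | github.com/rnscks/TurningMillingGenerator | pipeline.py | classify_trees_by_step_count
-- ===== SOURCE A (Python) =====
-- from typing import List, Dict, Optional, Tuple
--
-- def classify_trees_by_step_count(trees: List[Dict]) -> Dict[int, List[int]]:
--     """트리를 step 개수별로 분류."""
--     step_count_map: Dict[int, List[int]] = {}
--     for i, tree in enumerate(trees):
--         step_count = sum(1 for n in tree['nodes'] if n['label'] == 's')
--         if step_count not in step_count_map:
--             step_count_map[step_count] = []
--         step_count_map[step_count].append(i)
--     return step_count_map
-- ===== SOURCE B (Python) =====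
-- def classify_trees_by_step_count(trees):
--     """Two-phase: tabulate per-tree 's' counts, then build each group by a per-key scan."""
--     counts = [[n['label'] for n in tree['nodes']].count('s') for tree in trees]
--     return {c: [i for i, x in enumerate(counts) if x == c] for c in dict.fromkeys(counts)}
-- ===== Notes on version B (the rewrite author's own statement) =====
-- stated objective: alternative
-- what changed: A buckets indices into the dict incrementally in one enumerate pass; B first tabulates the per-tree 's' counts into a list (counting via a label list's .count), then builds the result as a dict comprehension over the deduplicated counts with a per-distinct-count scan of the count table.
import Mathlib
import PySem

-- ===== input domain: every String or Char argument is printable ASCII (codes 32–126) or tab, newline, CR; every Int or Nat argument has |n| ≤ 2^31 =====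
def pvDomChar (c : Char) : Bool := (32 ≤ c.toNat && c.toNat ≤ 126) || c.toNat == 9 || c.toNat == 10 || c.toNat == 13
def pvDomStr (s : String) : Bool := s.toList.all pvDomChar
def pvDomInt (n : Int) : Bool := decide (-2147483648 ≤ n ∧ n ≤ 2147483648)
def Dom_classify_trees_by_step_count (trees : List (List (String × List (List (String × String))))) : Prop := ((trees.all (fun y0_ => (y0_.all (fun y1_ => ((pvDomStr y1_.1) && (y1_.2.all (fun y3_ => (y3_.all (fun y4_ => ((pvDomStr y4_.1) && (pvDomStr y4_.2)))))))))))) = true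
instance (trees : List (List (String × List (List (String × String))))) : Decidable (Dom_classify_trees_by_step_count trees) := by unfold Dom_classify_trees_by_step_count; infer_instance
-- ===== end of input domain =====

-- B replaces A's single-pass incremental dict bucketing by a two-phase strategy (tabulate all
-- counts, then build each group with a per-distinct-count scan); objective: alternative, not faster.

-- ===== PORT A =====
-- sum(1 for n in tree['nodes'] if n['label'] == 's'); dict lookup = first match on the assoc list
def pvCountA (tree : List (String × List (List (String × String)))) : Int :=
  ((tree.lookup "nodes").getD []).foldl
    (fun acc n => if (n.lookup "label") == some "s" then acc + 1 else acc) 0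

def classify_trees_by_step_count (trees : List (List (String × List (List (String × String))))) : List (Int × List Int) :=
  ((PySem.List.enumerate trees 0).foldl
    (fun d p =>
      let k := pvCountA p.2
      let d := if d.contains k then d else d.insert k ([] : List Int)
      d.modify k [] (fun v => v ++ [p.1]))
    PySem.Dict.empty).items

-- ===== PORT B =====
-- [n['label'] for n in tree['nodes']].count('s')
def pvCountB (tree : List (String × List (List (String × String)))) : Int :=
  ((((tree.lookup "nodes").getD []).map (fun n => (n.lookup "label").getD "")).count "s" : Int)

def classify_trees_by_step_count_alt (trees : List (List (String × List (List (String × String))))) : List (Int × List Int) :=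
  let counts := trees.map pvCountB
  (PySem.List.dedup counts).map
    (fun c => (c, ((PySem.List.enumerate counts 0).filter (fun p => p.2 == c)).map (fun p => p.1)))

-- ===== PRECONDITION & SPEC =====
-- Pre_ excludes exactly the inputs where Python A raises KeyError: a tree without a "nodes" key,
-- or a node (of that tree's "nodes" value) without a "label" key.
def Pre_classify_trees_by_step_count (trees : List (List (String × List (List (String × String))))) : Prop :=
  ∀ t ∈ trees, (t.lookup "nodes").isSome = true ∧
    ∀ n ∈ (t.lookup "nodes").getD [], (n.lookup "label").isSome = true
instance (trees : List (List (String × List (List (String × String))))) : Decidable (Pre_classify_trees_by_step_count trees) := by unfold Pre_classify_trees_by_step_count; infer_instance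

def pvWitness_classify_trees_by_step_count : (List (List (String × List (List (String × String))))) :=
  [[("nodes", [[("label", "s")], [("label", "a")]])], [("nodes", [])]]

def Spec_classify_trees_by_step_count (trees : List (List (String × List (List (String × String))))) (out : List (Int × List Int)) : Prop := out = classify_trees_by_step_count_alt trees
instance (trees : List (List (String × List (List (String × String))))) (out : List (Int × List Int)) : Decidable (Spec_classify_trees_by_step_count trees out) := by unfold Spec_classify_trees_by_step_count; infer_instance

-- ===== CLAIM (what is proved, stated in full; the proofs are below) =====
def Claim_equal_classify_trees_by_step_count : Prop := ∀ (trees : List (List (String × List (List (String × String))))), Dom_classify_trees_by_step_count trees → Pre_classify_trees_by_step_count trees → Spec_classify_trees_by_step_count trees (classify_trees_by_step_count trees)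

-- ===== LEMMAS AND PROOFS =====

-- the per-tree 's'-counts of the two ports agree (on every input: a missing "label" yields "" ≠ "s" on both sides)
theorem pvCount_eq (t : List (String × List (List (String × String)))) : pvCountA t = pvCountB t := by
  unfold pvCountA pvCountB
  rw [PySem.List.foldl_count_if, List.count_eq_countP, List.countP_map]
  simp only [Int.zero_add, Int.natCast_inj]
  apply List.countP_congr
  intro n _
  cases h : n.lookup "label" <;> simp [h]

-- the "ensure key, then append" body of A's loop is a single modify-with-default
theorem pvSetdefault_modify (d : PySem.Dict Int (List Int)) (k : Int) (i : Int) :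
    (if d.contains k then d else d.insert k ([] : List Int)).modify k [] (fun v => v ++ [i])
      = d.modify k [] (fun v => v ++ [i]) := by
  by_cases h : d.contains k
  · simp [h]
  · simp only [h, Bool.false_eq_true, if_false]
    simp only [PySem.Dict.modify, PySem.Dict.getD_insert_self, PySem.Dict.insert_insert_self,
      PySem.Dict.getD_of_not_contains d [] (by simpa using h)]

theorem pvEnumerate_map {α β : Type} (f : α → β) (xs : List α) (s : Int) :
    PySem.List.enumerate (xs.map f) s = (PySem.List.enumerate xs s).map (fun p => (p.1, f p.2)) := by
  induction xs generalizing s with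
  | nil => simp [PySem.List.enumerate_nil]
  | cons x xs ih => simp [PySem.List.enumerate_cons, ih]

-- ===== VERDICT (by name: the statement is the Claim_ definition above) =====
theorem classify_trees_by_step_count_spec : Claim_equal_classify_trees_by_step_count := by
  intro trees _ _
  unfold Spec_classify_trees_by_step_count classify_trees_by_step_count classify_trees_by_step_count_alt
  -- A's loop body is a plain modify, over the (count, index) pairs
  have hbody : (PySem.List.enumerate trees 0).foldl
      (fun d p =>
        let k := pvCountA p.2
        let d := if d.contains k then d else d.insert k ([] : List Int)
        d.modify k [] (fun v => v ++ [p.1]))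
      PySem.Dict.empty
      = ((PySem.List.enumerate trees 0).map (fun p => (pvCountA p.2, p.1))).foldl
          (fun d q => d.modify q.1 [] (fun v => v ++ [q.2])) PySem.Dict.empty := by
    rw [List.foldl_map]
    exact PySem.List.foldl_congr_mem _ _ _ _ (fun d p _ => pvSetdefault_modify d (pvCountA p.2) p.1)
  have hnodup : ((PySem.List.enumerate trees 0).foldl
      (fun d p =>
        let k := pvCountA p.2
        let d := if d.contains k then d else d.insert k ([] : List Int)
        d.modify k [] (fun v => v ++ [p.1]))
      PySem.Dict.empty).keys.Nodup := by
    rw [hbody]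
    exact PySem.Dict.nodup_keys_foldl_modify_key _ Prod.fst []
      (fun _ q v => v ++ [q.2]) _ PySem.Dict.nodup_keys_empty
  rw [PySem.Dict.items_eq_map_keys _ hnodup []]
  -- keys: dedup of the counts, in first-occurrence order
  have hcounts : trees.map pvCountB = trees.map pvCountA := by
    simp [pvCount_eq]
  have hkeys : ((PySem.List.enumerate trees 0).foldl
      (fun d p =>
        let k := pvCountA p.2
        let d := if d.contains k then d else d.insert k ([] : List Int)
        d.modify k [] (fun v => v ++ [p.1]))
      PySem.Dict.empty).keys = PySem.List.dedup (trees.map pvCountA) := by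
    rw [hbody,
      PySem.Dict.keys_foldl_modify_key _ Prod.fst [] (fun _ q v => v ++ [q.2])]
    rw [PySem.Dict.keys_empty, PySem.Set.update_nil_left, PySem.List.dedup_eq_ofList]
    congr 1
    rw [List.map_map]
    conv_rhs => rw [← PySem.List.map_snd_enumerate trees 0]
    rw [List.map_map]
    rfl
  -- values at each key
  have hval : ∀ c : Int, ((PySem.List.enumerate trees 0).foldl
      (fun d p =>
        let k := pvCountA p.2
        let d := if d.contains k then d else d.insert k ([] : List Int)
        d.modify k [] (fun v => v ++ [p.1]))
      PySem.Dict.empty).getD c []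
      = ((PySem.List.enumerate (trees.map pvCountB) 0).filter (fun p => p.2 == c)).map (fun p => p.1) := by
    intro c
    rw [hbody, PySem.Dict.getD_foldl_modify_append, PySem.Dict.getD_empty, List.nil_append,
      List.filter_map, List.map_map, hcounts, pvEnumerate_map, List.filter_map, List.map_map]
    rfl
  simp only [hval, hkeys, hcounts]
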